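-- pv_equiv track=rewrite | github.com/1-Liam/DENSN-Atlas | fixtures/credit_window/negative_credit_wrap/validator.py | validate_trace
-- ===== SOURCE A (Python) =====
-- def validate_trace(events):
--     """
--     Simplified validator for the negative-transfer family with no BALANCE token.
--     """
--     active = False
--     for event in events:
--         if event == "GRANT":
--             if active:
--                 return False
--             active = True
--         elif event == "REVOKE":
--             if not active:
--                 return False
--             active = False
--         elif event == "CHARGE" and not active:
--             return False
--         else:
--             return False
--     return not active
-- ===== SOURCE B (Python) =====
-- def validate_trace(events):
--     evs = list(events)
--     return (len(evs) % 2 == 0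
--             and all(e == "GRANT" for e in evs[0::2])
--             and all(e == "REVOKE" for e in evs[1::2]))
-- ===== Notes on version B (the rewrite author's own statement) =====
-- stated objective: alternative
-- what changed: Replaced the stateful one-event-at-a-time state machine with a positional characterisation: a trace is valid iff it has even length, every even-indexed event is GRANT and every odd-indexed event is REVOKE, checked via two strided passes.
import Mathlib
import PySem

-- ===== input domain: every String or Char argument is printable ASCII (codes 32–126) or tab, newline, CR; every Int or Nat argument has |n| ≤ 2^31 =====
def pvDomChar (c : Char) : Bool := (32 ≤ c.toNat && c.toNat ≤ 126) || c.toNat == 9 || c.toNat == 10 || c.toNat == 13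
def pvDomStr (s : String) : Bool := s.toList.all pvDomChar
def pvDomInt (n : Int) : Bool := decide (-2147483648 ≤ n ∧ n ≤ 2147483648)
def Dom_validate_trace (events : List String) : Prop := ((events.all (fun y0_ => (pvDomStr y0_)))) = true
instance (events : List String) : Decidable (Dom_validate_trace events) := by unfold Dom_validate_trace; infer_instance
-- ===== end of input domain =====

-- B replaces A's running-state loop with a positional check (even length, GRANT at even indices, REVOKE at odd); alternative decomposition, same cost.

-- ===== PORT A =====
-- A's loop over events with the boolean state `active`; each branch in A's order.
def validate_trace_go (events : List String) (active : Bool) : Bool :=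
  match events with
  | [] => !active
  | e :: rest =>
    if e == "GRANT" then
      if active then false else validate_trace_go rest true
    else if e == "REVOKE" then
      if !active then false else validate_trace_go rest false
    else if e == "CHARGE" && !active then false
    else false

def validate_trace (events : List String) : Bool :=
  validate_trace_go events false

-- ===== PORT B =====
-- evs[0::2] (slice with step 2 starting at the head)
def pvEveryOther (xs : List String) : List String :=
  match xs with
  | [] => []
  | [x] => [x]
  | x :: _ :: rest => x :: pvEveryOther rest

def validate_trace_alt (events : List String) : Bool :=
  decide (events.length % 2 = 0)
    && (pvEveryOther events).all (fun e => e == "GRANT")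
    && (pvEveryOther (events.drop 1)).all (fun e => e == "REVOKE")

-- ===== PRECONDITION & SPEC =====
def Spec_validate_trace (events : List String) (out : Bool) : Prop := out = validate_trace_alt events
instance (events : List String) (out : Bool) : Decidable (Spec_validate_trace events out) := by unfold Spec_validate_trace; infer_instance

-- ===== CLAIM (what is proved, stated in full; the proofs are below) =====
def Claim_equal_validate_trace : Prop := ∀ (events : List String), Dom_validate_trace events → Spec_validate_trace events (validate_trace events)

-- ===== LEMMAS AND PROOFS =====

theorem pvEveryOther_cons_drop (y : String) (rest : List String) :
    pvEveryOther (y :: rest) = y :: pvEveryOther (rest.drop 1) := by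
  cases rest <;> simp [pvEveryOther]

theorem validate_trace_go_eq_alt (events : List String) :
    validate_trace_go events false = validate_trace_alt events := by
  induction events using pvEveryOther.induct with
  | case1 =>
    simp [validate_trace_go, validate_trace_alt, pvEveryOther]
  | case2 x =>
    by_cases hx : x = "GRANT" <;>
      simp [validate_trace_go, validate_trace_alt, pvEveryOther, hx]
  | case3 x y rest ih =>
    by_cases hx : x = "GRANT"
    · by_cases hy : y = "REVOKE"
      · simp [validate_trace_go, validate_trace_alt, hx, hy, pvEveryOther,
          pvEveryOther_cons_drop, Nat.add_mod] at ih ⊢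
        rw [ih]
        have h2 : ((rest.length % 2 % 2 + 1 % 2) % 2 % 2 + 1 % 2) % 2 = rest.length % 2 := by omega
        rw [h2]
      · simp [validate_trace_go, validate_trace_alt, hx, hy, pvEveryOther,
          pvEveryOther_cons_drop]
    · simp [validate_trace_go, validate_trace_alt, hx, pvEveryOther]

-- ===== VERDICT (by name: the statement is the Claim_ definition above) =====
theorem validate_trace_spec : Claim_equal_validate_trace := by
  intro events _
  unfold Spec_validate_trace validate_trace
  exact validate_trace_go_eq_alt events
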